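-- pv_equiv track=rewrite | github.com/wht306528-prog/sorting_robot | scripts/sweep_pingpong_white_thresholds.py | annotation_to_matrix
-- ===== SOURCE A (Python) =====
-- from typing import Any
--
-- ROWS = 10
--
-- COLS = 5
--
-- TRAYS = 3
--
-- def annotation_to_matrix(annotation: dict[str, Any]) -> dict[tuple[int, int, int], int]:
--     matrices = annotation.get('matrices_by_tray', {})
--     output: dict[tuple[int, int, int], int] = {}
--     for tray_id in range(1, TRAYS + 1):
--         matrix = matrices.get(str(tray_id), [])
--         for row in range(1, ROWS + 1):
--             for col in range(1, COLS + 1):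
--                 value = 0
--                 if row - 1 < len(matrix) and col - 1 < len(matrix[row - 1]):
--                     value = int(matrix[row - 1][col - 1])
--                 output[(tray_id, row, col)] = value if value in (0, 1, 2) else 0
--     return output
-- ===== SOURCE B (Python) =====
-- from typing import Any
--
-- ROWS = 10
--
-- COLS = 5
--
-- TRAYS = 3
--
-- def annotation_to_matrix(annotation: dict[str, Any]) -> dict[tuple[int, int, int], int]:
--     # Fill-then-overwrite: start from an all-zero grid, then walk only the cells
--     # that actually exist in each tray's matrix (capped at ROWS x COLS).
--     output = {(t, r, c): 0
--               for t in range(1, TRAYS + 1)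
--               for r in range(1, ROWS + 1)
--               for c in range(1, COLS + 1)}
--     matrices = annotation.get('matrices_by_tray', {})
--     for t in range(1, TRAYS + 1):
--         matrix = matrices.get(str(t), [])
--         for r, row_vals in enumerate(matrix[:ROWS], start=1):
--             for c, cell in enumerate(row_vals[:COLS], start=1):
--                 v = int(cell)
--                 output[(t, r, c)] = v if v in (0, 1, 2) else 0
--     return output
-- ===== Notes on version B (the rewrite author's own statement) =====
-- stated objective: alternative
-- what changed: A scans the full fixed TRAYSxROWSxCOLS grid and tests per cell whether the matrix covers it; B first builds the all-zero grid dict in one comprehension and then overwrites only the cells actually present in each tray's matrix, enumerating the matrix itself truncated to ROWSxCOLS.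
import Mathlib
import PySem

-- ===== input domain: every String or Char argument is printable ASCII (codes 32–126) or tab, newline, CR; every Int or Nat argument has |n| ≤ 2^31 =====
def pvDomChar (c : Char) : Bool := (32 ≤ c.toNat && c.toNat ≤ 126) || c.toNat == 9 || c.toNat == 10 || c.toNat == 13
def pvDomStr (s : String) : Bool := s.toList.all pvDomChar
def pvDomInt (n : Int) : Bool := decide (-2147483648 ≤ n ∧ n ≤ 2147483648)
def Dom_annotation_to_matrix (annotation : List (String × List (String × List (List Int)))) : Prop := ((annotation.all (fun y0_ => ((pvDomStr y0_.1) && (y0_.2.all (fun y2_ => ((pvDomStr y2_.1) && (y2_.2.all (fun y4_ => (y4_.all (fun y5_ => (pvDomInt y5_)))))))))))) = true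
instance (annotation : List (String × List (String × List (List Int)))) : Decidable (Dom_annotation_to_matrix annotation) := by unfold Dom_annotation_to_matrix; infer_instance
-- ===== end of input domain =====

-- B builds the all-zero grid dict first and then overwrites only the cells present in each
-- tray's matrix (truncated to the grid), instead of A's full-grid scan with per-cell bounds
-- tests; same cost, different decomposition.


-- ===== PORT A =====
-- module constants: ROWS = 10, COLS = 5, TRAYS = 3
def pvTRAYS : Int := 3
def pvROWS : Int := 10
def pvCOLS : Int := 5

-- literal transliteration of A: full TRAYS×ROWS×COLS scan, per-cell bounds test (the second
-- conjunct is only reached under the first, so the getD [] is never taken on an in-range row,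
-- exactly like Python's short-circuiting 'and'), {0,1,2} clamp; the dict is returned as its
-- (key-flattened) items list.
def annotation_to_matrix (annotation : List (String × List (String × List (List Int)))) : List (Int × Int × Int × Int) :=
  let matrices : PySem.Dict String (List (List Int)) :=
    PySem.Dict.mk ((PySem.Dict.mk annotation).getD "matrices_by_tray" [])
  let output : PySem.Dict (Int × Int × Int) Int :=
    (PySem.List.pyRange 1 (pvTRAYS + 1) 1).foldl (fun output tray_id =>
      let matrix := matrices.getD (PySem.Int.toStr tray_id) []
      (PySem.List.pyRange 1 (pvROWS + 1) 1).foldl (fun output row =>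
        (PySem.List.pyRange 1 (pvCOLS + 1) 1).foldl (fun output col =>
          let value : Int :=
            if row - 1 < PySem.List.len matrix ∧
                col - 1 < PySem.List.len ((PySem.List.pyGet? matrix (row - 1)).getD []) then
              (PySem.List.pyGet? ((PySem.List.pyGet? matrix (row - 1)).getD []) (col - 1)).getD 0
            else 0
          output.insert (tray_id, row, col) (if value = 0 ∨ value = 1 ∨ value = 2 then value else 0))
          output)
        output)
      PySem.Dict.empty
  output.items.map (fun p => (p.1.1, p.1.2.1, p.1.2.2, p.2))

-- ===== PORT B =====
-- literal transliteration of B (Source B): the all-zero grid dict is built first (the dict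
-- comprehension, as its insertion loop over the distinct keys), then only the cells present in
-- each tray's matrix — truncated by the slices matrix[:ROWS] / row[:COLS] — are overwritten.
def annotation_to_matrix_alt (annotation : List (String × List (String × List (List Int)))) : List (Int × Int × Int × Int) :=
  let output0 : PySem.Dict (Int × Int × Int) Int :=
    ((PySem.List.pyRange 1 (pvTRAYS + 1) 1).flatMap (fun t =>
      (PySem.List.pyRange 1 (pvROWS + 1) 1).flatMap (fun r =>
        (PySem.List.pyRange 1 (pvCOLS + 1) 1).map (fun c => (t, r, c))))).foldl
      (fun d k => d.insert k 0) PySem.Dict.empty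
  let matrices : PySem.Dict String (List (List Int)) :=
    PySem.Dict.mk ((PySem.Dict.mk annotation).getD "matrices_by_tray" [])
  let output : PySem.Dict (Int × Int × Int) Int :=
    (PySem.List.pyRange 1 (pvTRAYS + 1) 1).foldl (fun output t =>
      let matrix := matrices.getD (PySem.Int.toStr t) []
      (PySem.List.enumerate (PySem.List.slice matrix none (some pvROWS)) 1).foldl (fun output rp =>
        (PySem.List.enumerate (PySem.List.slice rp.2 none (some pvCOLS)) 1).foldl (fun output cp =>
          output.insert (t, rp.1, cp.1) (if cp.2 = 0 ∨ cp.2 = 1 ∨ cp.2 = 2 then cp.2 else 0))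
          output)
        output)
      output0
  output.items.map (fun p => (p.1.1, p.1.2.1, p.1.2.2, p.2))

-- ===== PRECONDITION & SPEC =====
def Spec_annotation_to_matrix (annotation : List (String × List (String × List (List Int)))) (out : List (Int × Int × Int × Int)) : Prop := out = annotation_to_matrix_alt annotation
instance (annotation : List (String × List (String × List (List Int)))) (out : List (Int × Int × Int × Int)) : Decidable (Spec_annotation_to_matrix annotation out) := by unfold Spec_annotation_to_matrix; infer_instance

-- ===== CLAIM (what is proved, stated in full; the proofs are below) =====
def Claim_equal_annotation_to_matrix : Prop := ∀ (annotation : List (String × List (String × List (List Int)))), Dom_annotation_to_matrix annotation → Spec_annotation_to_matrix annotation (annotation_to_matrix annotation)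

-- ===== LEMMAS AND PROOFS =====

-- proof-only abbreviations
def pvFlat (p : (Int × Int × Int) × Int) : Int × Int × Int × Int := (p.1.1, p.1.2.1, p.1.2.2, p.2)

def pvClamp (v : Int) : Int := if v = 0 ∨ v = 1 ∨ v = 2 then v else 0

def pvMats (annotation : List (String × List (String × List (List Int)))) : PySem.Dict String (List (List Int)) :=
  PySem.Dict.mk ((PySem.Dict.mk annotation).getD "matrices_by_tray" [])

-- A's per-cell value
def pvAval (m : List (List Int)) (r c : Int) : Int :=
  pvClamp (if r - 1 < PySem.List.len m ∧
      c - 1 < PySem.List.len ((PySem.List.pyGet? m (r - 1)).getD []) then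
    (PySem.List.pyGet? ((PySem.List.pyGet? m (r - 1)).getD []) (c - 1)).getD 0
  else 0)

def pvKeyList : List (Int × Int × Int) :=
  (PySem.List.pyRange 1 (pvTRAYS + 1) 1).flatMap (fun t =>
    (PySem.List.pyRange 1 (pvROWS + 1) 1).flatMap (fun r =>
      (PySem.List.pyRange 1 (pvCOLS + 1) 1).map (fun c => (t, r, c))))

-- B's per-tray update pairs
def pvU (m : List (List Int)) (t : Int) : List ((Int × Int × Int) × Int) :=
  (PySem.List.enumerate (PySem.List.slice m none (some pvROWS)) 1).flatMap (fun rp =>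
    (PySem.List.enumerate (PySem.List.slice rp.2 none (some pvCOLS)) 1).map (fun cp =>
      ((t, rp.1, cp.1), pvClamp cp.2)))

def pvUpd (mats : PySem.Dict String (List (List Int))) : List ((Int × Int × Int) × Int) :=
  (PySem.List.pyRange 1 (pvTRAYS + 1) 1).flatMap (fun t =>
    pvU (mats.getD (PySem.Int.toStr t) []) t)

set_option maxRecDepth 8192 in
lemma pv_nodup_keyList : pvKeyList.Nodup := by decide

lemma pv_mem_keyList (k : Int × Int × Int) :
    k ∈ pvKeyList ↔ (1 ≤ k.1 ∧ k.1 < 4) ∧ (1 ≤ k.2.1 ∧ k.2.1 < 11) ∧ (1 ≤ k.2.2 ∧ k.2.2 < 6) := by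
  obtain ⟨a, b, c⟩ := k
  simp only [pvKeyList, pvTRAYS, pvROWS, pvCOLS, List.mem_flatMap, List.mem_map,
    PySem.List.mem_pyRange_one, Prod.mk.injEq]
  constructor
  · rintro ⟨t, ht, r, hr, c', hc', h1, h2, h3⟩
    subst h1; subst h2; subst h3
    norm_num at ht hr hc' ⊢
    exact ⟨ht, hr, hc'⟩
  · rintro ⟨ha, hb, hc⟩
    exact ⟨a, by norm_num; omega, b, by norm_num; omega, c, by norm_num; omega, rfl, rfl, rfl⟩

lemma pv_slice10 (m : List (List Int)) : PySem.List.slice m none (some pvROWS) = m.take 10 := by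
  rw [pvROWS, PySem.List.slice_to m (by norm_num : (0:Int) ≤ 10)]; rfl

lemma pv_slice5 (l : List Int) : PySem.List.slice l none (some pvCOLS) = l.take 5 := by
  rw [pvCOLS, PySem.List.slice_to l (by norm_num : (0:Int) ≤ 5)]; rfl

-- final dict getD after a fold of inserts with pairwise-distinct keys

lemma pv_getD_foldl_insert {κ ν : Type} [BEq κ] [LawfulBEq κ] (u : List (κ × ν))
    (hn : (u.map Prod.fst).Nodup) (d : PySem.Dict κ ν) (k : κ) (dflt : ν) :
    (u.foldl (fun d p => d.insert p.1 p.2) d).getD k dflt =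
      match u.find? (fun p => p.1 == k) with
      | some p => p.2
      | none => d.getD k dflt := by
  induction u generalizing d with
  | nil => simp
  | cons p rest ih =>
    simp only [List.map_cons, List.nodup_cons] at hn
    simp only [List.foldl_cons, List.find?_cons]
    by_cases hk : p.1 = k
    · have hfind : rest.find? (fun q => q.1 == k) = none := by
        rw [List.find?_eq_none]
        intro q hq
        simp only [beq_iff_eq]
        intro h
        apply hn.1
        have : q.1 ∈ rest.map Prod.fst := List.mem_map_of_mem hq
        rwa [h, ← hk] at this
      rw [ih hn.2, hfind]
      simp [hk, PySem.Dict.getD_insert_self]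
    · have : (p.1 == k) = false := by simp [hk]
      rw [ih hn.2, this]
      cases hfind : rest.find? (fun q => q.1 == k) with
      | some q => simp
      | none => simp [PySem.Dict.getD_insert_of_ne _ _ _ (Ne.symm hk)]

lemma pv_find?_of_mem {κ ν : Type} [BEq κ] [LawfulBEq κ] {u : List (κ × ν)}
    (hn : (u.map Prod.fst).Nodup) {k : κ} {v : ν} (hm : (k, v) ∈ u) :
    u.find? (fun p => p.1 == k) = some (k, v) := by
  induction u with
  | nil => simp at hm
  | cons p rest ih =>
    simp only [List.map_cons, List.nodup_cons] at hn
    rcases List.mem_cons.mp hm with h | h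
    · subst h; simp
    · have hne : p.1 ≠ k := by
        intro he
        apply hn.1
        have : (k, v).1 ∈ rest.map Prod.fst := List.mem_map_of_mem h
        rwa [← he] at this
      simp only [List.find?_cons, show (p.1 == k) = false by simp [hne]]
      exact ih hn.2 h


lemma pv_mem_pvU {m : List (List Int)} {t : Int} {p : (Int × Int × Int) × Int} :
    p ∈ pvU m t ↔ ∃ i : Nat, i < (m.take 10).length ∧ ∃ j : Nat,
      j < (((m.take 10)[i]?.getD []).take 5).length ∧
      p = ((t, 1 + (i : Int), 1 + (j : Int)),
            pvClamp ((((m.take 10)[i]?.getD []).take 5)[j]?.getD 0)) := by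
  simp only [pvU, pv_slice10, pv_slice5, List.mem_flatMap, List.mem_map,
    PySem.List.mem_enumerate_iff]
  constructor
  · rintro ⟨rp, ⟨i, hi, rfl⟩, cp, ⟨j, hj, rfl⟩, rfl⟩
    refine ⟨i, hi, j, ?_, ?_⟩ <;>
      simp only [List.getElem?_eq_getElem hi, Option.getD_some]
    · exact hj
    · rw [List.getElem?_eq_getElem hj, Option.getD_some]
  · rintro ⟨i, hi, j, hj, rfl⟩
    rw [List.getElem?_eq_getElem hi, Option.getD_some] at hj
    refine ⟨(1 + (i : Int), (m.take 10)[i]'hi), ⟨i, hi, rfl⟩,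
      (1 + (j : Int), (((m.take 10)[i]'hi).take 5)[j]'hj), ⟨j, hj, rfl⟩, ?_⟩
    simp only [List.getElem?_eq_getElem hi, Option.getD_some,
      List.getElem?_eq_getElem hj]

lemma pv_nodup_keys_pvU (m : List (List Int)) (t : Int) : ((pvU m t).map Prod.fst).Nodup := by
  have h : (pvU m t).map Prod.fst =
      (PySem.List.enumerate (m.take 10) 1).flatMap (fun rp =>
        (PySem.List.enumerate (rp.2.take 5) 1).map (fun cp => (t, rp.1, cp.1))) := by
    simp only [pvU, pv_slice10, pv_slice5, List.map_flatMap, List.map_map]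
    rfl
  rw [h, List.nodup_flatMap]
  refine ⟨fun rp _ => ?_, ?_⟩
  · have h2 : (PySem.List.enumerate (rp.2.take 5) 1).map (fun cp => (t, rp.1, cp.1))
        = ((PySem.List.enumerate (rp.2.take 5) 1).map Prod.fst).map
            (fun a => (t, rp.1, a)) := by
      simp only [List.map_map]
      rfl
    rw [h2, PySem.List.map_fst_enumerate]
    exact (PySem.List.nodup_pyRange_one _ _).map (fun a b hab => by simpa using hab)
  · refine (PySem.List.pairwise_lt_enumerate _ _).imp ?_
    intro p q hlt x hxp hxq
    simp only [List.mem_map] at hxp hxq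
    obtain ⟨cp, _, hp⟩ := hxp
    obtain ⟨cq, _, hq⟩ := hxq
    rw [← hq] at hp
    have : p.1 = q.1 := by
      have := congrArg (fun z => z.2.1) hp
      simpa using this
    omega

lemma pv_nodup_keys_pvUpd (mats : PySem.Dict String (List (List Int))) :
    ((pvUpd mats).map Prod.fst).Nodup := by
  have h : (pvUpd mats).map Prod.fst =
      (PySem.List.pyRange 1 (pvTRAYS + 1) 1).flatMap (fun t =>
        (pvU (mats.getD (PySem.Int.toStr t) []) t).map Prod.fst) := by
    simp [pvUpd, List.map_flatMap]
  rw [h, List.nodup_flatMap]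
  refine ⟨fun t _ => pv_nodup_keys_pvU _ t, ?_⟩
  · refine (PySem.List.pairwise_lt_pyRange_one _ _).imp ?_
    intro t u hlt x hxt hxu
    simp only [List.mem_map] at hxt hxu
    obtain ⟨p, hpm, hp⟩ := hxt
    obtain ⟨q, hqm, hq⟩ := hxu
    obtain ⟨i, hi, j, hj, rfl⟩ := pv_mem_pvU.mp hpm
    obtain ⟨i', hi', j', hj', rfl⟩ := pv_mem_pvU.mp hqm
    rw [← hq] at hp
    have : t = u := by
      have := congrArg (fun z => z.1) hp
      simpa using this
    omega

-- flattening a triple insertion loop into one fold over the flattened pair list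
lemma pv_flatten3 {A B C K V : Type} [BEq K] (ts : List A) (rs : A → List B)
    (cs : A → B → List C) (key : A → B → C → K) (v : A → B → C → V) (d : PySem.Dict K V) :
    ts.foldl (fun d t => (rs t).foldl (fun d r =>
        (cs t r).foldl (fun d c => d.insert (key t r c) (v t r c)) d) d) d =
      (ts.flatMap (fun t => (rs t).flatMap (fun r =>
        (cs t r).map (fun c => (key t r c, v t r c))))).foldl
        (fun d p => d.insert p.1 p.2) d := by
  simp only [List.foldl_flatMap, List.foldl_map]

-- A's result as the key list with A's per-cell values
lemma pv_A_shape (annotation : List (String × List (String × List (List Int)))) :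
    annotation_to_matrix annotation =
      (pvKeyList.map (fun k =>
        (k, pvAval ((pvMats annotation).getD (PySem.Int.toStr k.1) []) k.2.1 k.2.2))).map pvFlat := by
  simp only [annotation_to_matrix]
  simp only [← pvMats.eq_1, ← pvClamp.eq_1, ← pvAval.eq_1]
  rw [pv_flatten3 (PySem.List.pyRange 1 (pvTRAYS + 1) 1)
    (fun _ => PySem.List.pyRange 1 (pvROWS + 1) 1)
    (fun _ _ => PySem.List.pyRange 1 (pvCOLS + 1) 1)
    (fun t r c => (t, r, c))
    (fun t r c => pvAval ((pvMats annotation).getD (PySem.Int.toStr t) []) r c)]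
  rw [PySem.Dict.items_foldl_insert_fresh _ Prod.fst Prod.snd _
    (fun a _ => PySem.Dict.contains_empty _) ?_]
  · simp only [show (PySem.Dict.empty : PySem.Dict (Int × Int × Int) Int).items = [] from rfl,
      List.nil_append, pvKeyList, List.map_flatMap, List.map_map]
    rfl
  · have h : (((PySem.List.pyRange 1 (pvTRAYS + 1) 1).flatMap (fun t =>
        (PySem.List.pyRange 1 (pvROWS + 1) 1).flatMap (fun r =>
          (PySem.List.pyRange 1 (pvCOLS + 1) 1).map (fun c =>
            ((t, r, c), pvAval ((pvMats annotation).getD (PySem.Int.toStr t) []) r c))))).map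
            Prod.fst) = pvKeyList := by
      simp only [pvKeyList, List.map_flatMap, List.map_map]
      rfl
    rw [h]; exact pv_nodup_keyList

lemma pv_base_items :
    (pvKeyList.foldl (fun d k => d.insert k 0)
        (PySem.Dict.empty : PySem.Dict (Int × Int × Int) Int)).items =
      pvKeyList.map (fun k => (k, (0 : Int))) := by
  rw [PySem.Dict.items_foldl_insert_fresh pvKeyList (fun a => a) (fun _ => (0 : Int)) _
    (fun a _ => PySem.Dict.contains_empty _) (by simpa using pv_nodup_keyList)]
  simp only [show (PySem.Dict.empty : PySem.Dict (Int × Int × Int) Int).items = [] from rfl,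
    List.nil_append]

lemma pv_base_keys :
    (pvKeyList.foldl (fun d k => d.insert k 0)
        (PySem.Dict.empty : PySem.Dict (Int × Int × Int) Int)).keys = pvKeyList := by
  show ((pvKeyList.foldl (fun d k => d.insert k 0)
    (PySem.Dict.empty : PySem.Dict (Int × Int × Int) Int)).items.map Prod.fst) = pvKeyList
  rw [pv_base_items]
  simp [List.map_map, Function.comp_def]

lemma pv_updKeys_mem (M : PySem.Dict String (List (List Int))) :
    ∀ p ∈ pvUpd M, p.1 ∈ pvKeyList := by
  intro p hp
  rw [pvUpd] at hp
  obtain ⟨t, ht, hpU⟩ := List.mem_flatMap.mp hp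
  rw [PySem.List.mem_pyRange_one, pvTRAYS] at ht
  obtain ⟨i, hi, j, hj, rfl⟩ := pv_mem_pvU.mp hpU
  have hi10 : i < 10 := lt_of_lt_of_le hi (List.length_take_le ..)
  have hj5 : j < 5 := lt_of_lt_of_le hj (List.length_take_le ..)
  simp only [pv_mem_keyList]
  omega

-- B's result as the key list with the final lookups
lemma pv_B_shape (annotation : List (String × List (String × List (List Int)))) :
    annotation_to_matrix_alt annotation =
      (pvKeyList.map (fun k => (k,
        ((pvUpd (pvMats annotation)).foldl (fun d p => d.insert p.1 p.2)
          (pvKeyList.foldl (fun d k => d.insert k 0) PySem.Dict.empty)).getD k 0))).map pvFlat := by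
  simp only [annotation_to_matrix_alt]
  simp only [← pvMats.eq_1, ← pvClamp.eq_1]
  rw [pv_flatten3 (PySem.List.pyRange 1 (pvTRAYS + 1) 1)
    (fun t => PySem.List.enumerate
      (PySem.List.slice ((pvMats annotation).getD (PySem.Int.toStr t) []) none (some pvROWS)) 1)
    (fun _ rp => PySem.List.enumerate (PySem.List.slice rp.2 none (some pvCOLS)) 1)
    (fun t rp cp => (t, rp.1, cp.1))
    (fun _ _ cp => pvClamp cp.2)]
  simp only [← pvKeyList.eq_1, ← pvU.eq_1, ← pvUpd.eq_1]
  have hbk := pv_base_keys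
  have hkeys : ((pvUpd (pvMats annotation)).foldl (fun d p => d.insert p.1 p.2)
      (pvKeyList.foldl (fun d k => d.insert k 0)
        (PySem.Dict.empty : PySem.Dict (Int × Int × Int) Int))).keys = pvKeyList := by
    rw [PySem.Dict.keys_foldl_insert_key (pvUpd (pvMats annotation)) Prod.fst (fun _ p => p.2),
      hbk, PySem.Set.update_eq_append_filter]
    have hnil : ((PySem.Set.ofList ((pvUpd (pvMats annotation)).map Prod.fst)).filter
        (fun y => !PySem.Set.contains pvKeyList y)) = [] := by
      rw [List.filter_eq_nil_iff]
      intro y hy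
      obtain ⟨p, hp, rfl⟩ := List.mem_map.mp ((PySem.Set.mem_ofList _ _).mp hy)
      simp only [Bool.not_eq_true', Bool.not_eq_false]
      exact (PySem.Set.contains_iff _ _).mpr (pv_updKeys_mem _ p hp)
    rw [hnil, List.append_nil]
  have hnd : ((pvUpd (pvMats annotation)).foldl (fun d p => d.insert p.1 p.2)
      (pvKeyList.foldl (fun d k => d.insert k 0)
        (PySem.Dict.empty : PySem.Dict (Int × Int × Int) Int))).keys.Nodup := by
    rw [hkeys]; exact pv_nodup_keyList
  rw [PySem.Dict.items_eq_map_keys _ hnd 0, hkeys]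
  rfl

-- the heart: per grid cell, B's final lookup is A's value
set_option maxRecDepth 4096 in
lemma pv_cell (mats : PySem.Dict String (List (List Int))) (t r c : Int)
    (ht : 1 ≤ t ∧ t < 4) (hr : 1 ≤ r ∧ r < 11) (hc : 1 ≤ c ∧ c < 6) :
    ((pvUpd mats).foldl (fun d p => d.insert p.1 p.2)
        (pvKeyList.foldl (fun d k => d.insert k 0) PySem.Dict.empty)).getD (t, r, c) 0 =
      pvAval (mats.getD (PySem.Int.toStr t) []) r c := by
  have hbase0 : (pvKeyList.foldl (fun d k => d.insert k 0)
      (PySem.Dict.empty : PySem.Dict (Int × Int × Int) Int)).getD (t, r, c) 0 = 0 := by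
    apply PySem.Dict.getD_of_mem_items
    · rw [pv_base_items]
      exact List.mem_map_of_mem ((pv_mem_keyList _).mpr (by simp only []; omega))
    · rw [pv_base_keys]; exact pv_nodup_keyList
  set m : List (List Int) := mats.getD (PySem.Int.toStr t) [] with hm
  rw [pv_getD_foldl_insert _ (pv_nodup_keys_pvUpd mats)]
  by_cases h1 : r - 1 < (m.length : Int)
  · -- the row exists
    have hi : (r - 1).toNat < m.length := by omega
    have hre : (r - 1 : Int) = ((r - 1).toNat : Int) := by omega
    have hget : PySem.List.pyGet? m (r - 1) = m[(r - 1).toNat]? := by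
      conv_lhs => rw [hre]
      rw [PySem.List.pyGet?_natCast]
    have hi10 : (r - 1).toNat < (m.take 10).length := by
      simp only [List.length_take]; omega
    have hrowe : (m.take 10)[(r - 1).toNat]?.getD [] = (PySem.List.pyGet? m (r - 1)).getD [] := by
      rw [hget, List.getElem?_take_of_lt (by omega : (r - 1).toNat < 10)]
    set row : List Int := (PySem.List.pyGet? m (r - 1)).getD [] with hrow
    by_cases h2 : c - 1 < (row.length : Int)
    · -- the cell exists: B overwrote it with A's clamped value
      have hj : (c - 1).toNat < row.length := by omega
      have hce : (c - 1 : Int) = ((c - 1).toNat : Int) := by omega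
      have hj5 : (c - 1).toNat < (((m.take 10)[(r - 1).toNat]?.getD []).take 5).length := by
        rw [hrowe]; simp only [List.length_take]; omega
      have hmemU : ((t, 1 + (((r - 1).toNat : Nat) : Int), 1 + (((c - 1).toNat : Nat) : Int)),
          pvClamp ((((m.take 10)[(r - 1).toNat]?.getD []).take 5)[(c - 1).toNat]?.getD 0))
          ∈ pvU m t :=
        pv_mem_pvU.mpr ⟨(r - 1).toNat, hi10, (c - 1).toNat, hj5, rfl⟩
      have hkey1 : 1 + (((r - 1).toNat : Nat) : Int) = r := by omega
      have hkey2 : 1 + (((c - 1).toNat : Nat) : Int) = c := by omega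
      rw [hkey1, hkey2, hrowe] at hmemU
      have hvale : (row.take 5)[(c - 1).toNat]?.getD 0 =
          (PySem.List.pyGet? row (c - 1)).getD 0 := by
        rw [List.getElem?_take_of_lt (by omega : (c - 1).toNat < 5)]
        conv_rhs => rw [hce]
        rw [PySem.List.pyGet?_natCast]
      rw [hvale] at hmemU
      have hmem : ((t, r, c), pvClamp ((PySem.List.pyGet? row (c - 1)).getD 0)) ∈ pvUpd mats := by
        rw [pvUpd]
        refine List.mem_flatMap.mpr ⟨t, ?_, by rw [← hm]; exact hmemU⟩
        rw [PySem.List.mem_pyRange_one, pvTRAYS]; omega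
      rw [pv_find?_of_mem (pv_nodup_keys_pvUpd mats) hmem]
      rw [pvAval]
      have hcond : r - 1 < PySem.List.len m ∧
          c - 1 < PySem.List.len ((PySem.List.pyGet? m (r - 1)).getD []) := by
        constructor
        · simpa using h1
        · rw [← hrow]; simpa using h2
      rw [if_pos hcond]
    · -- the cell is outside the row: both sides are untouched zero
      have hnone : (pvUpd mats).find? (fun p => p.1 == (t, r, c)) = none := by
        rw [List.find?_eq_none]
        intro p hp
        rw [pvUpd] at hp
        obtain ⟨t', ht', hpU⟩ := List.mem_flatMap.mp hp
        obtain ⟨i, hia, j, hja, rfl⟩ := pv_mem_pvU.mp hpU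
        simp only [beq_iff_eq, Prod.mk.injEq, not_and]
        intro het hrr hcc
        exfalso
        rw [het, ← hm] at hia hja
        apply h2
        have hieq : i = (r - 1).toNat := by omega
        rw [hieq, hrowe] at hja
        simp only [List.length_take] at hja
        omega
      rw [hnone, hbase0, pvAval]
      have hcond : ¬ (r - 1 < PySem.List.len m ∧
          c - 1 < PySem.List.len ((PySem.List.pyGet? m (r - 1)).getD [])) := by
        rintro ⟨-, hb⟩
        apply h2
        rw [← hrow] at hb
        simpa using hb
      rw [if_neg hcond]
      rfl
  · -- the row does not exist: both sides are untouched zero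
    have hnone : (pvUpd mats).find? (fun p => p.1 == (t, r, c)) = none := by
      rw [List.find?_eq_none]
      intro p hp
      rw [pvUpd] at hp
      obtain ⟨t', ht', hpU⟩ := List.mem_flatMap.mp hp
      obtain ⟨i, hia, j, hja, rfl⟩ := pv_mem_pvU.mp hpU
      simp only [beq_iff_eq, Prod.mk.injEq, not_and]
      intro het hrr hcc
      exfalso
      rw [het, ← hm] at hia
      simp only [List.length_take] at hia
      apply h1
      omega
    rw [hnone, hbase0, pvAval]
    have hcond : ¬ (r - 1 < PySem.List.len m ∧
        c - 1 < PySem.List.len ((PySem.List.pyGet? m (r - 1)).getD [])) := by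
      rintro ⟨ha, -⟩
      apply h1
      simpa using ha
    rw [if_neg hcond]
    rfl

-- ===== VERDICT (by name: the statement is the Claim_ definition above) =====
theorem annotation_to_matrix_spec : Claim_equal_annotation_to_matrix := by
  intro annotation _
  unfold Spec_annotation_to_matrix
  rw [pv_A_shape, pv_B_shape]
  congr 1
  apply List.map_congr_left
  intro k hk
  obtain ⟨⟨ha1, ha2⟩, ⟨hb1, hb2⟩, hc1, hc2⟩ := (pv_mem_keyList k).mp hk
  obtain ⟨a, b, c⟩ := k
  exact Prod.ext rfl (pv_cell (pvMats annotation) a b c ⟨ha1, ha2⟩ ⟨hb1, hb2⟩ ⟨hc1, hc2⟩).symm
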